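-- pv_equiv track=rewrite | github.com/mqt4n/OS_Project2 | reference/FAT32_NTFS_GUI/main.py | convert_chs
-- ===== SOURCE A (Python) =====
-- def convert_chs(chs_bits):
--     # convert each byte into a binary string
--     chs_bits = "".join("{:08b}".format(bit) for bit in chs_bits)
--     # convert the binary string to a dictionary
--     chs = {
--         "head": int(chs_bits[0:8], 2),
--         "sector": int(chs_bits[10:16], 2),
--         "cylinder": int(chs_bits[8:10] + chs_bits[16:24], 2),
--     }
--     return chs
-- ===== SOURCE B (Python) =====
-- def convert_chs(chs_bits):
--     head = chs_bits[0]
--     packed = chs_bits[1]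
--     if not (0 <= packed <= 255):
--         raise ValueError("sector/cylinder byte out of range")
--     cylinder = packed // 64          # the two high cylinder bits
--     sector = packed % 64
--     if len(chs_bits) > 2:
--         low = chs_bits[2]
--         if not (0 <= low <= 255):
--             raise ValueError("cylinder byte out of range")
--         cylinder = cylinder * 256 + low
--     return {"head": head, "sector": sector, "cylinder": cylinder}
-- ===== Notes on version B (the rewrite author's own statement) =====
-- stated objective: idiomatic
-- what changed: B drops the binary-string construction entirely and extracts head/sector/cylinder with integer arithmetic (% 64 and // 64) on the raw bytes, validating that the bit-packed bytes are 0..255, instead of formatting every byte to an 8-bit string, concatenating, slicing and re-parsing with int(.,2); like A, a 2-byte field yields only the two high cylinder bits.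
-- outside the precondition, e.g. on convert_chs([1, -5, 3]): A returns {'head': 1, 'sector': 5, 'cylinder': -3}, B raises ValueError; on convert_chs([1, 300, 3]): A returns {'head': 1, 'sector': 22, 'cylinder': 513}, B raises ValueError
import Mathlib
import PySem

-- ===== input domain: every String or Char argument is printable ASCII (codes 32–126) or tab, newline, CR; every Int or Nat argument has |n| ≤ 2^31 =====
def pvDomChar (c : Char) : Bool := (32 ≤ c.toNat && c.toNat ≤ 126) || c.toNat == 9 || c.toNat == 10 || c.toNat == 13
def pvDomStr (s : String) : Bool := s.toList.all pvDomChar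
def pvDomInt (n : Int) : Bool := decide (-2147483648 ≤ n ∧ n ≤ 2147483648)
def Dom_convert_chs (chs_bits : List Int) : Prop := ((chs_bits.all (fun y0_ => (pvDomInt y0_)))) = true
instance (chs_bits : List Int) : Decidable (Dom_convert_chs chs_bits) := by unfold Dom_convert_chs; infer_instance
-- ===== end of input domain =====

-- B replaces A's format-to-binary-string / slice / int(.,2) round-trip by direct integer
-- arithmetic (% 64 and // 64) on the raw CHS bytes; equal on aligned byte lists (see Pre_).


-- ===== PORT A =====
-- "{:08b}".format(n): binary digits of n (PySem.Int.toBinChars), zero-padded to width 8,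
-- zeros inserted after the sign — exact hand port of the format spec '08b'.
def fmt08b (n : Int) : List Char :=
  let d := PySem.Int.toBinChars n
  if d.length < 8 then
    match d with
    | '-' :: rest => '-' :: (List.replicate (8 - d.length) '0' ++ rest)
    | _ => List.replicate (8 - d.length) '0' ++ d
  else d

def convert_chs (chs_bits : List Int) : List (String × Int) :=
  -- chs_bits = "".join("{:08b}".format(bit) for bit in chs_bits)
  let s := (chs_bits.map fmt08b).flatten
  -- int(s[0:8], 2), int(s[10:16], 2), int(s[8:10] + s[16:24], 2); none = ValueError (outside Pre_)
  match PySem.Int.ofCharsBase? (PySem.List.slice s (some 0) (some 8)) 2,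
        PySem.Int.ofCharsBase? (PySem.List.slice s (some 10) (some 16)) 2,
        PySem.Int.ofCharsBase? (PySem.List.slice s (some 8) (some 10) ++ PySem.List.slice s (some 16) (some 24)) 2 with
  | some h, some sec, some cyl => [("head", h), ("sector", sec), ("cylinder", cyl)]
  | _, _, _ => []

-- ===== PORT B =====
def convert_chs_alt (chs_bits : List Int) : List (String × Int) :=
  -- sequential indexing chs_bits[0], chs_bits[1]; none = IndexError (outside Pre_)
  match PySem.List.pyGet? chs_bits 0 with
  | none => []
  | some head =>
    match PySem.List.pyGet? chs_bits 1 with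
    | none => []
    | some packed =>
      -- if not (0 <= packed <= 255): raise ValueError  (outside Pre_)
      if 0 ≤ packed ∧ packed ≤ 255 then
        let cylinder := PySem.Int.floordiv packed 64
        let sector := PySem.Int.mod packed 64
        if 2 < PySem.List.len chs_bits then
          match PySem.List.pyGet? chs_bits 2 with
          | none => []  -- unreachable: index 2 is in range under the length guard
          | some low =>
            -- if not (0 <= low <= 255): raise ValueError  (outside Pre_)
            if 0 ≤ low ∧ low ≤ 255 then
              [("head", head), ("sector", sector), ("cylinder", cylinder * 256 + low)]
            else []
        else [("head", head), ("sector", sector), ("cylinder", cylinder)]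
      else []

-- ===== PRECONDITION & SPEC =====
-- Pre_ keeps the inputs on which A's 8-characters-per-byte layout is aligned: at least two
-- entries, the first in -127..255 and the second (and third, when present) a byte 0..255.
-- Outside it A either raises ValueError (fewer than 2 entries, or a '-' sign landing inside a
-- slice) or, when an entry's formatted width differs from 8 (entry > 255, first entry < -127,
-- second/third entry negative), its fixed-position slices no longer correspond to the
-- head/sector/cylinder fields of the CHS layout; B instead raises ValueError when a bit-packed
-- byte is out of range and otherwise does plain byte arithmetic.
def Pre_convert_chs (chs_bits : List Int) : Prop :=
  2 ≤ chs_bits.length ∧ (∀ x ∈ chs_bits.take 1, -127 ≤ x ∧ x ≤ 255) ∧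
    (∀ x ∈ (chs_bits.drop 1).take 2, 0 ≤ x ∧ x ≤ 255)
instance (chs_bits : List Int) : Decidable (Pre_convert_chs chs_bits) := by unfold Pre_convert_chs; infer_instance
def pvWitness_convert_chs : List Int := [16, 200, 77]

def Spec_convert_chs (chs_bits : List Int) (out : List (String × Int)) : Prop := out = convert_chs_alt chs_bits
instance (chs_bits : List Int) (out : List (String × Int)) : Decidable (Spec_convert_chs chs_bits out) := by unfold Spec_convert_chs; infer_instance

-- ===== CLAIM (what is proved, stated in full; the proofs are below) =====
def Claim_equal_convert_chs : Prop := ∀ (chs_bits : List Int), Dom_convert_chs chs_bits → Pre_convert_chs chs_bits → Spec_convert_chs chs_bits (convert_chs chs_bits)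

-- ===== LEMMAS AND PROOFS =====
def bitsTop2 : Fin 4 → List Char
  | 0 => ['0','0'] | 1 => ['0','1'] | 2 => ['1','0'] | 3 => ['1','1']

set_option maxRecDepth 40000 in
theorem fmt08b_length_wide : ∀ x : Fin 383, (fmt08b (((x : Nat) : Int) - 127)).length = 8 := by decide

set_option maxRecDepth 40000 in
theorem parse_fmt08b_wide : ∀ x : Fin 383,
    PySem.Int.ofCharsBase? (fmt08b (((x : Nat) : Int) - 127)) 2 = some (((x : Nat) : Int) - 127) := by decide

set_option maxRecDepth 10000 in
theorem fmt08b_length : ∀ x : Fin 256, (fmt08b ((x : Nat) : Int)).length = 8 := by decide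

set_option maxRecDepth 10000 in
theorem parse_fmt08b_drop2 : ∀ x : Fin 256,
    PySem.Int.ofCharsBase? ((fmt08b ((x : Nat) : Int)).drop 2) 2
      = some (PySem.Int.mod ((x : Nat) : Int) 64) := by decide

set_option maxRecDepth 10000 in
theorem fmt08b_take2 : ∀ x : Fin 256,
    (fmt08b ((x : Nat) : Int)).take 2 = bitsTop2 (Fin.ofNat 4 ((x : Nat) / 64)) := by decide

theorem parse_top2 : ∀ q : Fin 4,
    PySem.Int.ofCharsBase? (bitsTop2 q) 2 = some ((q : Nat) : Int) := by decide

set_option maxRecDepth 10000 in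
theorem parse_top2_append : ∀ (q : Fin 4) (y : Fin 256),
    PySem.Int.ofCharsBase? (bitsTop2 q ++ fmt08b ((y : Nat) : Int)) 2
      = some (((q : Nat) * 256 + (y : Nat) : Nat) : Int) := by decide

theorem floordiv_byte (n : Nat) : PySem.Int.floordiv ((n : Nat) : Int) 64 = ((n / 64 : Nat) : Int) := by
  exact_mod_cast PySem.Int.floordiv_natCast n 64

theorem ofNat4_val (n : Nat) (h : n < 4) : ((Fin.ofNat 4 n : Fin 4) : Nat) = n := by
  simp [Fin.ofNat]; omega

theorem convert_chs_spec : Claim_equal_convert_chs := by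
  intro l _ hpre
  obtain ⟨hlen, h1, h2⟩ := hpre
  match l, hlen with
  | a :: b :: rest, _ =>
    have ha := h1 a (by simp)
    have hb := h2 b (by simp)
    set fa : Fin 383 := ⟨(a + 127).toNat, by omega⟩ with hfa
    set fb : Fin 256 := ⟨b.toNat, by omega⟩ with hfb
    have haa : a = ((fa : Nat) : Int) - 127 := by simp [hfa]; omega
    have hbb : b = ((fb : Nat) : Int) := by simp [hfb]; omega
    have hLa : (fmt08b (((fa : Nat) : Int) - 127)).length = 8 := fmt08b_length_wide fa
    have hLb : (fmt08b ((fb : Nat) : Int)).length = 8 := fmt08b_length fb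
    match rest with
    | [] =>
      -- two-byte field: s[16:24] is empty and the cylinder keeps only its two high bits
      unfold Spec_convert_chs convert_chs convert_chs_alt
      simp only [List.map_cons, List.map_nil, List.flatten_cons, List.flatten_nil, List.append_nil]
      rw [haa, hbb]
      set Fa := fmt08b (((fa : Nat) : Int) - 127) with hFa
      set Fb := fmt08b ((fb : Nat) : Int) with hFb
      have hsplitB : Fb = Fb.take 2 ++ Fb.drop 2 := (List.take_append_drop 2 Fb).symm
      have hL2 : (Fb.take 2).length = 2 := by simp [hLb]
      have hL6 : (Fb.drop 2).length = 6 := by simp [hLb]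
      set s : List Char := Fa ++ Fb with hs
      have hs08 : PySem.List.slice s (some 0) (some 8) = Fa := by
        rw [PySem.List.slice_toNat s (by norm_num) (by norm_num)]
        show List.take 8 (List.drop 0 s) = Fa
        rw [List.drop_zero, hs]
        exact List.take_left' hLa
      have hs810 : PySem.List.slice s (some 8) (some 10) = Fb.take 2 := by
        rw [PySem.List.slice_toNat s (by norm_num) (by norm_num)]
        show List.take 2 (List.drop 8 s) = Fb.take 2
        rw [hs, List.drop_left' hLa]
      have hs1016 : PySem.List.slice s (some 10) (some 16) = Fb.drop 2 := by
        rw [PySem.List.slice_toNat s (by norm_num) (by norm_num)]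
        show List.take 6 (List.drop 10 s) = Fb.drop 2
        have hre : s = (Fa ++ Fb.take 2) ++ Fb.drop 2 := by
          rw [hs]
          conv_lhs => rw [hsplitB]
          simp only [List.append_assoc]
        rw [hre, List.drop_left' (by simp [hLa, hL2])]
        exact List.take_of_length_le (by omega)
      have hs1624 : PySem.List.slice s (some 16) (some 24) = [] := by
        rw [PySem.List.slice_toNat s (by norm_num) (by norm_num)]
        show List.take 8 (List.drop 16 s) = []
        rw [List.drop_eq_nil_of_le (by simp [hs, hLa, hLb])]
        rfl
      rw [hs08, hs810, hs1016, hs1624]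
      rw [parse_fmt08b_wide fa, parse_fmt08b_drop2 fb]
      rw [fmt08b_take2 fb, List.append_nil, parse_top2 (Fin.ofNat 4 ((fb : Nat) / 64))]
      have g0 : PySem.List.pyGet? ((((fa : Nat) : Int) - 127) :: [((fb : Nat) : Int)]) 0
          = some (((fa : Nat) : Int) - 127) := PySem.List.pyGet?_zero_cons _ _
      have g1 : PySem.List.pyGet? ((((fa : Nat) : Int) - 127) :: [((fb : Nat) : Int)]) 1
          = some ((fb : Nat) : Int) := by
        rw [show (1 : Int) = ((1 : Nat) : Int) from rfl, PySem.List.pyGet?_natCast]; simp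
      rw [g0, g1]
      have hlen2 : ¬ (2 < PySem.List.len ((((fa : Nat) : Int) - 127) :: [((fb : Nat) : Int)])) := by
        simp [PySem.List.len_eq]
      have hbv : (0 : Int) ≤ ((fb : Nat) : Int) ∧ ((fb : Nat) : Int) ≤ 255 := by
        have := fb.isLt; omega
      simp only [if_pos hbv, hlen2, if_false]
      rw [ofNat4_val ((fb : Nat) / 64) (by have := fb.isLt; omega), floordiv_byte]
    | c :: rest' =>
      have hc := h2 c (by simp)
      set fc : Fin 256 := ⟨c.toNat, by omega⟩ with hfc
      have hcc : c = ((fc : Nat) : Int) := by simp [hfc]; omega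
      have hLc : (fmt08b ((fc : Nat) : Int)).length = 8 := fmt08b_length fc
      unfold Spec_convert_chs convert_chs convert_chs_alt
      simp only [List.map_cons, List.flatten_cons]
      rw [haa, hbb, hcc]
      set J : List Char := (rest'.map fmt08b).flatten with hJ
      set Fa := fmt08b (((fa : Nat) : Int) - 127) with hFa
      set Fb := fmt08b ((fb : Nat) : Int) with hFb
      set Fc := fmt08b ((fc : Nat) : Int) with hFc
      set s : List Char := Fa ++ (Fb ++ (Fc ++ J)) with hs
      have hsplitB : Fb = Fb.take 2 ++ Fb.drop 2 := (List.take_append_drop 2 Fb).symm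
      have hL2 : (Fb.take 2).length = 2 := by simp [hLb]
      have hL6 : (Fb.drop 2).length = 6 := by simp [hLb]
      have hs08 : PySem.List.slice s (some 0) (some 8) = Fa := by
        rw [PySem.List.slice_toNat s (by norm_num) (by norm_num)]
        show List.take 8 (List.drop 0 s) = Fa
        rw [List.drop_zero, hs]
        exact List.take_left' hLa
      have hs810 : PySem.List.slice s (some 8) (some 10) = Fb.take 2 := by
        rw [PySem.List.slice_toNat s (by norm_num) (by norm_num)]
        show List.take 2 (List.drop 8 s) = Fb.take 2
        rw [hs, List.drop_left' hLa]
        conv_lhs => rw [hsplitB]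
        rw [List.append_assoc]
        exact List.take_left' hL2
      have hs1016 : PySem.List.slice s (some 10) (some 16) = Fb.drop 2 := by
        rw [PySem.List.slice_toNat s (by norm_num) (by norm_num)]
        show List.take 6 (List.drop 10 s) = Fb.drop 2
        have hre : s = (Fa ++ Fb.take 2) ++ (Fb.drop 2 ++ (Fc ++ J)) := by
          rw [hs]
          conv_lhs => rw [hsplitB]
          simp only [List.append_assoc]
        rw [hre, List.drop_left' (by simp [hLa, hL2])]
        exact List.take_left' hL6
      have hs1624 : PySem.List.slice s (some 16) (some 24) = Fc := by
        rw [PySem.List.slice_toNat s (by norm_num) (by norm_num)]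
        show List.take 8 (List.drop 16 s) = Fc
        have hre : s = (Fa ++ Fb) ++ (Fc ++ J) := by rw [hs]; simp [List.append_assoc]
        rw [hre, List.drop_left' (by simp [hLa, hLb])]
        exact List.take_left' hLc
      rw [hs08, hs810, hs1016, hs1624]
      rw [parse_fmt08b_wide fa, parse_fmt08b_drop2 fb]
      rw [fmt08b_take2 fb, parse_top2_append (Fin.ofNat 4 ((fb : Nat) / 64)) fc]
      have g0 : PySem.List.pyGet? ((((fa : Nat) : Int) - 127) :: ((fb : Nat) : Int) :: ((fc : Nat) : Int) :: rest') 0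
          = some (((fa : Nat) : Int) - 127) := PySem.List.pyGet?_zero_cons _ _
      have g1 : PySem.List.pyGet? ((((fa : Nat) : Int) - 127) :: ((fb : Nat) : Int) :: ((fc : Nat) : Int) :: rest') 1
          = some ((fb : Nat) : Int) := by
        rw [show (1 : Int) = ((1 : Nat) : Int) from rfl, PySem.List.pyGet?_natCast]; simp
      rw [g0, g1]
      have hlen3 : 2 < PySem.List.len ((((fa : Nat) : Int) - 127) :: ((fb : Nat) : Int) :: ((fc : Nat) : Int) :: rest') := by
        simp [PySem.List.len_eq]
        omega
      have hbv : (0 : Int) ≤ ((fb : Nat) : Int) ∧ ((fb : Nat) : Int) ≤ 255 := by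
        have := fb.isLt; omega
      have hcv : (0 : Int) ≤ ((fc : Nat) : Int) ∧ ((fc : Nat) : Int) ≤ 255 := by
        have := fc.isLt; omega
      have g2 : PySem.List.pyGet? ((((fa : Nat) : Int) - 127) :: ((fb : Nat) : Int) :: ((fc : Nat) : Int) :: rest') 2
          = some ((fc : Nat) : Int) := by
        rw [show (2 : Int) = ((2 : Nat) : Int) from rfl, PySem.List.pyGet?_natCast]; simp
      simp only [if_pos hbv, hlen3, if_true, g2, if_pos hcv]
      rw [ofNat4_val ((fb : Nat) / 64) (by have := fb.isLt; omega), floordiv_byte]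
      push_cast
      ring_nf
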